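-- pv_equiv track=rewrite | github.com/zack-metiva/NLWeb | code/python/core/retriever.py | _deduplicate_by_url
-- ===== SOURCE A (Python) =====
-- from typing import List, Dict, Any, Optional, Union, Tuple, Type
--
-- def _deduplicate_by_url(results: List[List[str]]) -> List[List[str]]:
--     """
--     Deduplicate search results by URL, keeping the entry with longer content.
--
--     Args:
--         results: List of search results from multiple endpoints
--
--     Returns:
--         Deduplicated list of results
--     """
--     url_to_result = {}
--
--     for result in results:
--         # Assuming result format is [url, title, content, ...]
--         if len(result) >= 3:
--             url = result[0]
--             content = result[2] if len(result) > 2 else ""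
--
--             # If URL not seen before or current content is longer, keep it
--             if url not in url_to_result or len(content) > len(url_to_result[url][2]):
--                 url_to_result[url] = result
--
--     # Return deduplicated results
--     return list(url_to_result.values())
-- ===== SOURCE B (Python) =====
-- def _deduplicate_by_url(results):
--     groups = {}
--     for result in results:
--         if len(result) >= 3:
--             groups.setdefault(result[0], []).append(result)
--     return [max(group, key=lambda r: len(r[2])) for group in groups.values()]
-- ===== Notes on version B (the rewrite author's own statement) =====
-- stated objective: simpler
-- what changed: Replaces the single-pass running-max with in-place dict overwrites by a two-phase group-by-URL (setdefault buckets) followed by max(group, key=content length) per bucket; Python's max keeps the first maximal element, matching A's strict > tie-break, and first-seen URL order is preserved by both.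
import Mathlib
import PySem

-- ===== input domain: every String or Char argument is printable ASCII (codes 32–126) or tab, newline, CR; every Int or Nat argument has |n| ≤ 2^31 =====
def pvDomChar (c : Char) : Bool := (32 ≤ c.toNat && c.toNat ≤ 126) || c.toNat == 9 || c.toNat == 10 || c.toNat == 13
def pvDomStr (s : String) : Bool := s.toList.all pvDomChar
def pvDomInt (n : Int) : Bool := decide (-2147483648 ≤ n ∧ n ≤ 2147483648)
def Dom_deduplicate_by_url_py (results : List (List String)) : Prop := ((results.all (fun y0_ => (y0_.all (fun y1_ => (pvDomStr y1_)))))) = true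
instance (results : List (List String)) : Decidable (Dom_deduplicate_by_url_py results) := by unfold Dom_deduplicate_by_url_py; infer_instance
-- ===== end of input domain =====

-- B replaces A's single-pass running max with a group-by-URL pass plus a per-group max; objective: simpler two-phase decomposition.

-- ===== PORT A =====
-- one loop step of A: skip short rows; keep row if URL unseen or content strictly longer
-- (result[0] / result[2] ported via pyGet?; the guards len(result) >= 3 ensure the index is in range, so getD "" is never the default)
def dedupA_step (d : PySem.Dict String (List String)) (result : List String) : PySem.Dict String (List String) :=
  if 3 ≤ result.length then
    let url := (PySem.List.pyGet? result 0).getD ""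
    let content := if 2 < result.length then (PySem.List.pyGet? result 2).getD "" else ""
    if d.contains url = false then d.insert url result
    else if PySem.Str.len ((PySem.List.pyGet? ((d.get? url).getD []) 2).getD "") < PySem.Str.len content
      then d.insert url result
      else d
  else d

def deduplicate_by_url_py (results : List (List String)) : List (List String) :=
  (results.foldl dedupA_step PySem.Dict.empty).values

-- ===== PORT B =====
-- first pass of B: dict of lists keyed by url, groups.setdefault(url, []).append(result) = Dict.modify url [] (· ++ [result])
def dedupB_groups (results : List (List String)) : PySem.Dict String (List (List String)) :=
  results.foldl
    (fun g result =>
      if 3 ≤ result.length then g.modify ((PySem.List.pyGet? result 0).getD "") [] (· ++ [result]) else g)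
    PySem.Dict.empty

-- second pass: max(group, key=lambda r: len(r[2])); groups are nonempty so max? is never none
def deduplicate_by_url_py_alt (results : List (List String)) : List (List String) :=
  (dedupB_groups results).values.map
    (fun group => (PySem.List.max? group (fun r => PySem.Str.len ((PySem.List.pyGet? r 2).getD ""))).getD [])

-- ===== PRECONDITION & SPEC =====
def Spec_deduplicate_by_url_py (results : List (List String)) (out : List (List String)) : Prop := out = deduplicate_by_url_py_alt results
instance (results : List (List String)) (out : List (List String)) : Decidable (Spec_deduplicate_by_url_py results out) := by unfold Spec_deduplicate_by_url_py; infer_instance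

-- ===== CLAIM (what is proved, stated in full; the proofs are below) =====
def Claim_equal_deduplicate_by_url_py : Prop := ∀ (results : List (List String)), Dom_deduplicate_by_url_py results → Spec_deduplicate_by_url_py results (deduplicate_by_url_py results)

-- ===== LEMMAS AND PROOFS =====

-- the content length used by both programs
def pvLen (r : List String) : Int := PySem.Str.len ((PySem.List.pyGet? r 2).getD "")
-- map a B-items entry (url, group) to the A-items entry it represents (url, best row of the group)
def pvH (p : String × List (List String)) : String × List String :=
  (p.1, (PySem.List.max? p.2 (fun r => pvLen r)).getD [])

-- B's loop body, named for the proofs (definitionally the lambda inside dedupB_groups)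
def pvStepB (g : PySem.Dict String (List (List String))) (result : List String) :
    PySem.Dict String (List (List String)) :=
  if 3 ≤ result.length then g.modify ((PySem.List.pyGet? result 0).getD "") [] (· ++ [result]) else g

theorem pvMax_append (g : List (List String)) (r m0 : List String)
    (hm : PySem.List.max? g (fun x => pvLen x) = some m0) :
    PySem.List.max? (g ++ [r]) (fun x => pvLen x)
      = if pvLen m0 < pvLen r then some r else some m0 := by
  simp only [PySem.List.max?] at hm ⊢
  rw [List.foldl_append, hm]
  rfl

theorem pvFind_unique (u : String) (p0 : String × List (List String))
    (l : List (String × List (List String)))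
    (hn : (l.map Prod.fst).Nodup)
    (hf : l.find? (fun p => p.1 == u) = some p0) :
    ∀ p ∈ l, (p.1 == u) = true → p = p0 := by
  induction l with
  | nil => simp at hf
  | cons h t ih =>
    simp only [List.map_cons, List.nodup_cons] at hn
    intro p hp hpu
    by_cases hh : (h.1 == u) = true
    · have hf' : p0 = h := by
        rw [List.find?_cons] at hf
        simp [hh] at hf
        exact hf.symm
      subst hf'
      rcases List.mem_cons.mp hp with rfl | hp
      · rfl
      · exfalso
        have h1 : p.1 = u := by simpa using hpu
        have h2 : p0.1 = u := by simpa using hh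
        exact hn.1 (by rw [h2, ← h1]; exact List.mem_map_of_mem hp)
    · have hf' : List.find? (fun p => p.1 == u) t = some p0 := by
        rw [List.find?_cons] at hf
        simpa [hh] using hf
      rcases List.mem_cons.mp hp with rfl | hp
      · exact absurd hpu hh
      · exact ih hn.2 hf' p hp hpu

theorem pvAny_map_H (u : String) (l : List (String × List (List String))) :
    ((l.map pvH).any (fun p => p.1 == u)) = (l.any (fun p => p.1 == u)) := by
  induction l with
  | nil => rfl
  | cons h t ih => simp [pvH, ih]

theorem pvFind_map_H (u : String) (l : List (String × List (List String))) :
    ((l.map pvH).find? (fun p => p.1 == u)) = (l.find? (fun p => p.1 == u)).map pvH := by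
  induction l with
  | nil => rfl
  | cons h t ih =>
    rw [List.map_cons, List.find?_cons, List.find?_cons]
    by_cases hh : (h.1 == u) = true
    · simp [pvH, hh]
    · simp [pvH, hh, ih]

theorem pvKeys_replace (u : String) (v : List (List String))
    (l : List (String × List (List String))) :
    (l.map (fun p => if (p.1 == u) = true then (u, v) else p)).map Prod.fst
      = l.map Prod.fst := by
  rw [List.map_map]
  apply List.map_congr_left
  intro p _
  by_cases hpu : (p.1 == u) = true
  · simp only [Function.comp, hpu, if_pos]
    exact ((by simpa using hpu : p.1 = u)).symm
  · simp [Function.comp, hpu]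

theorem pvStepB_nodup (g : PySem.Dict String (List (List String))) (r : List String)
    (hn : (g.items.map Prod.fst).Nodup) :
    ((pvStepB g r).items.map Prod.fst).Nodup := by
  unfold pvStepB PySem.Dict.modify PySem.Dict.insert PySem.Dict.contains
  split
  · split
    · dsimp only
      rw [pvKeys_replace]
      exact hn
    · rename_i hc
      dsimp only
      rw [List.map_append, List.nodup_append]
      refine ⟨hn, List.nodup_singleton _, ?_⟩
      intro a ha b hb
      simp only [List.map_cons, List.map_nil, List.mem_singleton] at hb
      subst hb
      rcases List.mem_map.mp ha with ⟨p, hp, rfl⟩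
      intro hpk
      apply hc
      exact List.any_eq_true.mpr ⟨p, hp, by simp [hpk]⟩
  · exact hn

theorem pvStepB_ne (g : PySem.Dict String (List (List String))) (r : List String)
    (hne : ∀ p ∈ g.items, p.2 ≠ []) :
    ∀ p ∈ (pvStepB g r).items, p.2 ≠ [] := by
  unfold pvStepB PySem.Dict.modify PySem.Dict.insert PySem.Dict.contains
  split
  · split
    · intro p hp
      rcases List.mem_map.mp hp with ⟨q, hq, rfl⟩
      by_cases hqu : (q.1 == ((PySem.List.pyGet? r 0).getD "")) = true
      · simp [hqu]
      · simp only [hqu, Bool.false_eq_true, if_false]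
        exact hne q hq
    · intro p hp
      rcases List.mem_append.mp hp with h | h
      · exact hne p h
      · simp at h
        simp [h]
  · exact hne

theorem pvStep_eq (l : List (String × List (List String)))
    (hn : (l.map Prod.fst).Nodup) (hne : ∀ p ∈ l, p.2 ≠ []) (r : List String) :
    dedupA_step (PySem.Dict.mk (l.map pvH)) r
      = PySem.Dict.mk ((pvStepB (PySem.Dict.mk l) r).items.map pvH) := by
  unfold dedupA_step pvStepB
  by_cases hlen : 3 ≤ r.length
  · have h2 : 2 < r.length := hlen
    simp only [hlen, if_pos, h2]
    unfold PySem.Dict.modify PySem.Dict.insert PySem.Dict.contains PySem.Dict.getD PySem.Dict.get?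
    dsimp only
    rw [pvAny_map_H, pvFind_map_H]
    by_cases hany : (l.any (fun p => p.1 == ((PySem.List.pyGet? r 0).getD ""))) = true
    · -- URL already present
      obtain ⟨p0, hf⟩ : ∃ p0, l.find? (fun p => p.1 == ((PySem.List.pyGet? r 0).getD "")) = some p0 := by
        cases hfind : l.find? (fun p => p.1 == ((PySem.List.pyGet? r 0).getD "")) with
        | none =>
          exfalso
          rw [List.find?_eq_none] at hfind
          rcases List.any_eq_true.mp hany with ⟨p, hp, hpu⟩
          exact hfind p hp hpu
        | some q => exact ⟨q, rfl⟩
      have hp0mem : p0 ∈ l := List.mem_of_find?_eq_some hf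
      have hp0key : (p0.1 == ((PySem.List.pyGet? r 0).getD "")) = true := by
        have hk := List.find?_some hf
        exact hk
      obtain ⟨m0, hm0⟩ : ∃ m0, PySem.List.max? p0.2 (fun x => pvLen x) = some m0 := by
        cases hmx : PySem.List.max? p0.2 (fun x => pvLen x) with
        | none => exact absurd ((PySem.List.max?_eq_none_iff _ _).mp hmx) (hne p0 hp0mem)
        | some m => exact ⟨m, rfl⟩
      simp only [hany, hf, Option.map_some, Option.getD_some, if_true, Bool.true_eq_false,
        if_false, pvH, hm0]
      have hbest : PySem.List.max? (p0.2 ++ [r]) (fun x => pvLen x)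
          = if pvLen m0 < pvLen r then some r else some m0 := pvMax_append p0.2 r m0 hm0
      by_cases hc : pvLen m0 < pvLen r
      · rw [if_pos (by simpa [pvLen] using hc)]
        congr 1
        simp only [List.map_map]
        apply List.map_congr_left
        intro p _
        by_cases hpu : (p.1 == ((PySem.List.pyGet? r 0).getD "")) = true
        · simp [Function.comp, pvH, hpu, hbest, hc]
        · simp [Function.comp, pvH, hpu]
      · rw [if_neg (by simpa [pvLen] using hc)]
        congr 1
        simp only [List.map_map]
        symm
        apply List.map_congr_left
        intro p hp
        by_cases hpu : (p.1 == ((PySem.List.pyGet? r 0).getD "")) = true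
        · have hpp0 : p = p0 := pvFind_unique _ p0 l hn hf p hp hpu
          subst hpp0
          simp only [Function.comp, hpu, if_pos, pvH, hbest, hc, if_false, hm0,
            Option.getD_some]
          exact Prod.ext ((by simpa using hp0key : p.1 = _)).symm rfl
        · simp [Function.comp, pvH, hpu]
    · -- new URL
      rw [List.find?_eq_none.mpr (fun p hp => by
        intro hpu
        exact hany (List.any_eq_true.mpr ⟨p, hp, hpu⟩))]
      simp only [hany, Option.map_none, Option.getD_none, List.nil_append, Bool.false_eq_true,
        if_false, reduceIte, List.map_append]
      rfl
  · simp only [hlen, if_false]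

theorem pvFold (results : List (List String)) :
    ∀ (g : PySem.Dict String (List (List String))),
      (g.items.map Prod.fst).Nodup → (∀ p ∈ g.items, p.2 ≠ []) →
      results.foldl dedupA_step (PySem.Dict.mk (g.items.map pvH))
        = PySem.Dict.mk ((results.foldl pvStepB g).items.map pvH) := by
  induction results with
  | nil => intro g _ _; rfl
  | cons r t ih =>
    intro g hn hne
    simp only [List.foldl_cons]
    rw [pvStep_eq g.items hn hne r]
    exact ih (pvStepB g r) (pvStepB_nodup g r hn) (pvStepB_ne g r hne)

theorem pvFoldB_eq (results : List (List String)) :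
    dedupB_groups results = results.foldl pvStepB PySem.Dict.empty := rfl

-- ===== VERDICT (by name: the statement is the Claim_ definition above) =====
theorem deduplicate_by_url_py_spec : Claim_equal_deduplicate_by_url_py := by
  intro results _
  unfold Spec_deduplicate_by_url_py deduplicate_by_url_py deduplicate_by_url_py_alt
  have hn : ((PySem.Dict.empty : PySem.Dict String (List (List String))).items.map Prod.fst).Nodup := by
    simp [PySem.Dict.empty]
  have hne : ∀ p ∈ (PySem.Dict.empty : PySem.Dict String (List (List String))).items, p.2 ≠ [] := by
    simp [PySem.Dict.empty]
  have h : results.foldl dedupA_step PySem.Dict.empty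
      = PySem.Dict.mk ((results.foldl pvStepB PySem.Dict.empty).items.map pvH) :=
    pvFold results PySem.Dict.empty hn hne
  rw [pvFoldB_eq, h]
  simp only [PySem.Dict.values, List.map_map]
  apply List.map_congr_left
  intro p _
  rfl
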